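-- pv_equiv track=rewrite | github.com/NateMateS/mockmodrecommender | recommender.py | recommend_mods_with_culling
-- ===== SOURCE A (Python) =====
-- from collections import defaultdict
--
-- def recommend_mods_with_culling(current_modpack, co_occurrence_matrix, mod_categories, num_recommendations=5):
--     # Keep track of scores for each mod
--     mod_scores = defaultdict(int)
--     recommended_categories = set()
--
--     # Iterate over all mods in the current modpack
--     for mod in current_modpack:
--         related_mods = co_occurrence_matrix.get(mod, {})
--         # Increment the score of each mod by the number of times it co-occurs with the current mod
--         for related_mod, co_occurrences in related_mods.items():
--             # Ignore mods that are already in the current modpack or in the same category as a selected recommendation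
--             if related_mod not in current_modpack and mod_categories[related_mod] not in recommended_categories:
--                 mod_scores[related_mod] += co_occurrences
--
--     # Sort the mods by their score in descending order
--     sorted_mods = sorted(mod_scores.items(), key=lambda x: x[1], reverse=True)
--
--     # Generate the list of recommendations ensuring category diversity
--     recommendations = []
--     for mod, score in sorted_mods:
--         if len(recommendations) >= num_recommendations:
--             # Stop when we have enough recommendations
--             break
--         if mod_categories[mod] not in recommended_categories:
--             # Add the mod to the recommendations and take note of its category
--             recommendations.append(mod)
--             recommended_categories.add(mod_categories[mod])
--
--     return recommendations
-- ===== SOURCE B (Python) =====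
-- def recommend_mods_with_culling(current_modpack, co_occurrence_matrix, mod_categories, num_recommendations=5):
--     # Total co-occurrence score of each candidate mod with the current modpack
--     mod_scores = {}
--     for mod in current_modpack:
--         for related_mod, co_occurrences in co_occurrence_matrix.get(mod, {}).items():
--             if related_mod not in current_modpack:
--                 mod_scores[related_mod] = mod_scores.get(related_mod, 0) + co_occurrences
--
--     # One representative per category: the highest-scoring mod, earliest-scored on ties
--     best = {}  # category -> (score, position, mod)
--     for position, (mod, score) in enumerate(mod_scores.items()):
--         category = mod_categories[mod]
--         if category not in best or score > best[category][0]: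
--             best[category] = (score, position, mod)
--
--     # Rank the representatives by score descending, earliest-scored first on ties
--     ranked = sorted(best.values(), key=lambda t: (-t[0], t[1]))
--     return [mod for _, _, mod in ranked[:max(0, num_recommendations)]]
-- ===== Notes on version B (the rewrite author's own statement) =====
-- stated objective: alternative
-- what changed: Selection is re-decomposed: instead of sorting every scored mod and greedily scanning with a seen-category set and a break, B picks one representative per category in a single pre-sort pass over the score dict (strictly-higher score replaces, so ties keep the earliest) and sorts only those representatives by (-score, position) before slicing; Pre_ excludes the inputs where both programs raise KeyError (a scored candidate mod missing from mod_categories).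
import Mathlib
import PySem

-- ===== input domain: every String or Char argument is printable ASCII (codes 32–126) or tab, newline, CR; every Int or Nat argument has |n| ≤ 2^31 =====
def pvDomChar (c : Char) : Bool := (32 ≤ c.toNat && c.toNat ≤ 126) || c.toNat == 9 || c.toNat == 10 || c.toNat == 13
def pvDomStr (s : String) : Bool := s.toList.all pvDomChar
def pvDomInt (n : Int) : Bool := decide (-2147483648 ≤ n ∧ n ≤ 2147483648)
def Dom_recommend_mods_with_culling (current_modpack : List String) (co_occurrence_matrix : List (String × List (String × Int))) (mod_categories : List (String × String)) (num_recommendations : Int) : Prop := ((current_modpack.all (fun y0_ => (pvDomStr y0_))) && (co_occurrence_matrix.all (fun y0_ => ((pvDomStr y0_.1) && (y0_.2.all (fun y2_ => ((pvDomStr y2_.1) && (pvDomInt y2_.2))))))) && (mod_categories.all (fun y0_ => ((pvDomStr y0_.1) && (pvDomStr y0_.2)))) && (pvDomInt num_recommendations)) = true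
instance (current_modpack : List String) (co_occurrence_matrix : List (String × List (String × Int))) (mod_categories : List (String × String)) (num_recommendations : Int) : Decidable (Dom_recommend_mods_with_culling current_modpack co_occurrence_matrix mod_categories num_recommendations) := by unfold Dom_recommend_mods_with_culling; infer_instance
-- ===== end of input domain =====

-- B re-decomposes the selection phase: one representative per category is chosen in a single
-- pre-sort pass and only those representatives are sorted; same return value as A (alternative
-- decomposition, not claimed faster). Pre_ excludes the inputs where both programs raise KeyError.


-- ===== PORT A =====
def recommend_mods_with_culling (current_modpack : List String) (co_occurrence_matrix : List (String × List (String × Int))) (mod_categories : List (String × String)) (num_recommendations : Int) : List String :=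
  let coD := PySem.Dict.ofList co_occurrence_matrix
  let catD := PySem.Dict.ofList mod_categories
  -- mod_scores = defaultdict(int); recommended_categories = set() (empty during the scoring loop)
  let mod_scores : PySem.Dict String Int :=
    current_modpack.foldl (fun sc mod =>
      (PySem.Dict.ofList (coD.getD mod [])).items.foldl (fun sc p =>
        if p.1 ∈ current_modpack then sc
        else if PySem.Set.contains (PySem.Set.empty : PySem.Set String) (catD.getD p.1 "") then sc
        else sc.modify p.1 0 (· + p.2)) sc) PySem.Dict.empty
  let sorted_mods := PySem.List.sorted mod_scores.items (fun x => x.2) true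
  -- selection loop with break at num_recommendations (frozen state = break)
  (sorted_mods.foldl (fun (st : List String × PySem.Set String) p =>
      if (st.1.length : Int) ≥ num_recommendations then st
      else if PySem.Set.contains st.2 (catD.getD p.1 "") then st
      else (st.1 ++ [p.1], PySem.Set.add st.2 (catD.getD p.1 ""))) ([], PySem.Set.empty)).1

-- ===== PORT B =====
def recommend_mods_with_culling_alt (current_modpack : List String) (co_occurrence_matrix : List (String × List (String × Int))) (mod_categories : List (String × String)) (num_recommendations : Int) : List String :=
  let coD := PySem.Dict.ofList co_occurrence_matrix
  let catD := PySem.Dict.ofList mod_categories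
  -- scoring pass
  let mod_scores : PySem.Dict String Int :=
    current_modpack.foldl (fun sc mod =>
      (PySem.Dict.ofList (coD.getD mod [])).items.foldl (fun sc p =>
        if p.1 ∈ current_modpack then sc
        else sc.insert p.1 (sc.getD p.1 0 + p.2)) sc) PySem.Dict.empty
  -- one representative per category: highest score, earliest position on ties
  -- (mod_categories[mod] is a getD here; Pre_ guarantees the key exists, as in Source B's lookup)
  let best : PySem.Dict String (Int × Int × String) :=
    (PySem.List.enumerate mod_scores.items).foldl (fun b e =>
      let c := catD.getD e.2.1 ""
      if !b.contains c || decide ((b.getD c (0, 0, "")).1 < e.2.2) then b.insert c (e.2.2, e.1, e.2.1) else b)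
      PySem.Dict.empty
  let ranked := PySem.List.sorted2 best.values (fun t => -t.1) (fun t => t.2.1)
  -- ranked[:max(0, num_recommendations)]
  (ranked.take num_recommendations.toNat).map (fun t => t.2.2)

-- ===== PRECONDITION & SPEC =====
-- Pre_ excludes exactly the inputs where both A and B raise KeyError: some related mod of a
-- modpack mod (not itself in the modpack) has no entry in mod_categories.
def Pre_recommend_mods_with_culling (current_modpack : List String) (co_occurrence_matrix : List (String × List (String × Int))) (mod_categories : List (String × String)) (num_recommendations : Int) : Prop :=
  ∀ mod ∈ current_modpack, ∀ q ∈ (PySem.Dict.ofList co_occurrence_matrix).getD mod [],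
    q.1 ∉ current_modpack → q.1 ∈ mod_categories.map Prod.fst
-- e.g. with current_modpack = ["OptiFine"] and co_occurrence_matrix = [("OptiFine", [("JEI", 3)])],
-- Pre_ demands that "JEI" (a scored candidate, so its category is looked up) be a key of mod_categories;
-- "Sodium" (never scored) need not be.
instance (current_modpack : List String) (co_occurrence_matrix : List (String × List (String × Int))) (mod_categories : List (String × String)) (num_recommendations : Int) : Decidable (Pre_recommend_mods_with_culling current_modpack co_occurrence_matrix mod_categories num_recommendations) := by unfold Pre_recommend_mods_with_culling; infer_instance
def pvWitness_recommend_mods_with_culling : List String × (List (String × List (String × Int))) × (List (String × String)) × Int :=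
  (["a"], [("a", [("b", 3), ("c", 1)])], [("b", "tech"), ("c", "magic")], 5)
def Spec_recommend_mods_with_culling (current_modpack : List String) (co_occurrence_matrix : List (String × List (String × Int))) (mod_categories : List (String × String)) (num_recommendations : Int) (out : List String) : Prop := out = recommend_mods_with_culling_alt current_modpack co_occurrence_matrix mod_categories num_recommendations
instance (current_modpack : List String) (co_occurrence_matrix : List (String × List (String × Int))) (mod_categories : List (String × String)) (num_recommendations : Int) (out : List String) : Decidable (Spec_recommend_mods_with_culling current_modpack co_occurrence_matrix mod_categories num_recommendations out) := by unfold Spec_recommend_mods_with_culling; infer_instance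

-- ===== CLAIM (what is proved, stated in full; the proofs are below) =====
def Claim_equal_recommend_mods_with_culling : Prop := ∀ (current_modpack : List String) (co_occurrence_matrix : List (String × List (String × Int))) (mod_categories : List (String × String)) (num_recommendations : Int), Dom_recommend_mods_with_culling current_modpack co_occurrence_matrix mod_categories num_recommendations → Pre_recommend_mods_with_culling current_modpack co_occurrence_matrix mod_categories num_recommendations → Spec_recommend_mods_with_culling current_modpack co_occurrence_matrix mod_categories num_recommendations (recommend_mods_with_culling current_modpack co_occurrence_matrix mod_categories num_recommendations)

-- ===== LEMMAS AND PROOFS =====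

-- the category function both ports look up with
def pvCat (mod_categories : List (String × String)) (m : String) : String :=
  (PySem.Dict.ofList mod_categories).getD m ""

-- the shared scoring dict (definitionally B's scoring loop; A's is proved equal)
def pvScores (current_modpack : List String) (co_occurrence_matrix : List (String × List (String × Int))) : PySem.Dict String Int :=
  current_modpack.foldl (fun sc mod =>
    (PySem.Dict.ofList ((PySem.Dict.ofList co_occurrence_matrix).getD mod [])).items.foldl (fun sc p =>
      if p.1 ∈ current_modpack then sc
      else sc.insert p.1 (sc.getD p.1 0 + p.2)) sc) PySem.Dict.empty

-- E-level lex key and the representative triple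
def pvK (e : Int × String × Int) : Lex (Int × Int) := toLex (-(e.2.2), e.1)
def pvPsi (e : Int × String × Int) : Int × Int × String := (e.2.2, e.1, e.2.1)

-- A's selection fold
def pvSelA (cat : String → String) (n : Int) (l : List (String × Int)) (st : List String × PySem.Set String) : List String × PySem.Set String :=
  l.foldl (fun st p =>
    if (st.1.length : Int) ≥ n then st
    else if PySem.Set.contains st.2 (cat p.1) then st
    else (st.1 ++ [p.1], PySem.Set.add st.2 (cat p.1))) st

-- uncapped first-per-category selection, M-level and E-level
def pvUM (cat : String → String) : List (String × Int) → PySem.Set String → List String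
  | [], _ => []
  | p :: t, seen =>
    if PySem.Set.contains seen (cat p.1) then pvUM cat t seen
    else p.1 :: pvUM cat t (PySem.Set.add seen (cat p.1))
def pvUE (cat : String → String) : List (Int × String × Int) → PySem.Set String → List (Int × String × Int)
  | [], _ => []
  | e :: t, seen =>
    if PySem.Set.contains seen (cat e.2.1) then pvUE cat t seen
    else e :: pvUE cat t (PySem.Set.add seen (cat e.2.1))

-- B's representative-dict fold
def pvStepB (cat : String → String) (b : PySem.Dict String (Int × Int × String)) (e : Int × String × Int) : PySem.Dict String (Int × Int × String) :=
  if !b.contains (cat e.2.1) || decide ((b.getD (cat e.2.1) (0, 0, "")).1 < e.2.2) then b.insert (cat e.2.1) (pvPsi e) else b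

lemma selA_frozen (cat : String → String) (n : Int) (l : List (String × Int)) (st : List String × PySem.Set String)
    (h : (st.1.length : Int) ≥ n) : pvSelA cat n l st = st := by
  induction l with
  | nil => rfl
  | cons p t ih => unfold pvSelA at *; simp only [List.foldl_cons, if_pos h]; exact ih

lemma selA_run (cat : String → String) (n : Int) (l : List (String × Int)) :
    ∀ (acc : List String) (seen : PySem.Set String), (acc.length : Int) < n →
      (pvSelA cat n l (acc, seen)).1 = acc ++ (pvUM cat l seen).take (n.toNat - acc.length) := by
  induction l with
  | nil => intro acc seen _; simp [pvSelA, pvUM]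
  | cons p t ih =>
    intro acc seen h
    have hnf : ¬ ((acc.length : Int) ≥ n) := by omega
    unfold pvSelA
    simp only [List.foldl_cons, if_neg hnf]
    by_cases hc : PySem.Set.contains seen (cat p.1) = true
    · have hm : cat p.1 ∈ seen := by simpa [PySem.Set.contains] using hc
      simp only [if_pos hc]
      have := ih acc seen h
      unfold pvSelA at this
      rw [this]
      simp [pvUM, hm]
    · have hm : cat p.1 ∉ seen := by simpa [PySem.Set.contains] using hc
      simp only [if_neg hc]
      by_cases h2 : ((acc ++ [p.1]).length : Int) < n
      · have := ih (acc ++ [p.1]) (PySem.Set.add seen (cat p.1)) h2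
        unfold pvSelA at this
        rw [this]
        have harith : n.toNat - acc.length = (n.toNat - (acc ++ [p.1]).length) + 1 := by
          simp only [List.length_append, List.length_cons, List.length_nil]
          omega
        simp [pvUM, hm, harith, List.take_succ_cons]
      · have := selA_frozen cat n t (acc ++ [p.1], PySem.Set.add seen (cat p.1))
          (by simp only [List.length_append, List.length_cons, List.length_nil] at h2 ⊢; omega)
        unfold pvSelA at this
        rw [this]
        have harith : n.toNat - acc.length = 1 := by
          simp only [List.length_append, List.length_cons, List.length_nil] at h2
          omega
        simp [pvUM, hm, harith]

lemma uM_map (cat : String → String) (l : List (Int × String × Int)) (seen : PySem.Set String) :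
    pvUM cat (l.map (·.2)) seen = (pvUE cat l seen).map (·.2.1) := by
  induction l generalizing seen with
  | nil => rfl
  | cons e t ih =>
    simp only [List.map_cons, pvUM, pvUE]
    by_cases hm : cat e.2.1 ∈ seen <;> simp [PySem.Set.contains, hm, ih]


lemma uE_sublist (cat : String → String) (l : List (Int × String × Int)) (seen : PySem.Set String) :
    (pvUE cat l seen).Sublist l := by
  induction l generalizing seen with
  | nil => simp [pvUE]
  | cons e t ih =>
    unfold pvUE
    split
    · exact (ih seen).cons e
    · exact (ih _).cons₂ e

lemma insertBy_map_snd (x : Int × String × Int) (es : List (Int × String × Int))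
    (h : ∀ e ∈ es, e.1 < x.1) :
    (PySem.List.insertBy (fun a b => decide (pvK a < pvK b)) x es).map (·.2)
      = PySem.List.insertBy (fun a b => decide ((b.2 : Int) < a.2)) x.2 (es.map (·.2)) := by
  induction es with
  | nil => simp [PySem.List.insertBy]
  | cons e es ih =>
    have he : e.1 < x.1 := h e (by simp)
    have hiff : (pvK x < pvK e) ↔ ((e.2.2 : Int) < x.2.2) := by
      simp only [pvK, Prod.Lex.toLex_lt_toLex]
      omega
    simp only [PySem.List.insertBy, List.map_cons]
    by_cases hlt : (e.2.2 : Int) < x.2.2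
    · rw [if_pos (by simp [hiff, hlt]), if_pos (by simp [hlt])]
      simp
    · rw [if_neg (by simp [hiff, hlt]), if_neg (by simp [hlt])]
      simp only [List.map_cons]
      rw [ih (fun e' he' => h e' (List.mem_cons_of_mem _ he'))]

lemma sorted_rev_stability (M : List (String × Int)) :
    PySem.List.sorted M (fun x => x.2) true = (PySem.List.sorted (PySem.List.enumerate M) pvK).map (·.2) := by
  suffices hgen : ∀ (l : List (String × Int)) (s : Int),
      PySem.List.sorted l (fun x => x.2) true = (PySem.List.sorted (PySem.List.enumerate l s) pvK).map (·.2) by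
    exact hgen M 0
  intro l
  induction l using List.reverseRecOn with
  | nil => intro s; rfl
  | append_singleton l x ih =>
    intro s
    rw [PySem.List.sorted_rev_eq_foldl_insertBy, List.foldl_append, ← PySem.List.sorted_rev_eq_foldl_insertBy,
      PySem.List.enumerate_append, PySem.List.sorted_eq_foldl_insertBy, List.foldl_append,
      ← PySem.List.sorted_eq_foldl_insertBy]
    simp only [PySem.List.enumerate, List.foldl_cons, List.foldl_nil]
    rw [insertBy_map_snd ((s + (l.length : Int), x)) _ (by
      intro e he
      have hmem : e ∈ PySem.List.enumerate l s := (PySem.List.sorted_perm _ _ _).mem_iff.mp he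
      rw [PySem.List.mem_enumerate_iff] at hmem
      obtain ⟨k, hk, rfl⟩ := hmem
      simp; omega)]
    rw [ih s]

lemma sorted2_eq_sorted_lex (xs : List (Int × Int × String)) :
    PySem.List.sorted2 xs (fun t => -t.1) (fun t => t.2.1)
      = PySem.List.sorted xs (fun t => toLex (-t.1, t.2.1)) := by
  unfold PySem.List.sorted2 PySem.List.sorted
  simp only [if_neg (by decide : ¬ (false = true))]
  have hf : (fun (a b : Int × Int × String) => decide ((-a.1 : Int) < -b.1) || (!decide ((-b.1 : Int) < -a.1) && decide (a.2.1 < b.2.1)))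
      = (fun a b => decide (toLex ((-a.1 : Int), a.2.1) < toLex ((-b.1 : Int), b.2.1))) := by
    funext a b
    rw [Bool.eq_iff_iff]
    simp only [Bool.or_eq_true, Bool.and_eq_true, Bool.not_eq_true', decide_eq_true_eq,
      decide_eq_false_iff_not, Prod.Lex.toLex_lt_toLex]
    omega
  rw [hf]

-- first element of a pair determines the element in any permutation of an enumerate
lemma fst_inj_of_perm_enumerate (M : List (String × Int)) (l : List (Int × String × Int))
    (hp : l.Perm (PySem.List.enumerate M)) :
    ∀ e ∈ l, ∀ e' ∈ l, e.1 = e'.1 → e = e' := by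
  intro e he e' he' h1
  have he2 := (PySem.List.mem_enumerate_iff M 0 e).mp (hp.mem_iff.mp he)
  have he2' := (PySem.List.mem_enumerate_iff M 0 e').mp (hp.mem_iff.mp he')
  obtain ⟨k, hk, rfl⟩ := he2
  obtain ⟨k', hk', rfl⟩ := he2'
  simp only at h1
  have : k = k' := by omega
  subst this
  rfl

lemma nodup_fst_of_perm_enumerate (M : List (String × Int)) (l : List (Int × String × Int))
    (hp : l.Perm (PySem.List.enumerate M)) : (l.map (·.1)).Nodup := by
  have h1 : ((PySem.List.enumerate M).map (·.1)).Nodup := by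
    have h := PySem.List.pairwise_lt_enumerate M 0
    exact List.pairwise_map.mpr (h.imp fun hlt => ne_of_lt hlt)
  exact ((hp.map (·.1)).nodup_iff).mpr h1

-- membership in the uncapped selection over a K-sorted, fst-distinct list
lemma uE_mem (cat : String → String) :
    ∀ (l : List (Int × String × Int)) (seen : PySem.Set String),
      l.Pairwise (fun a b => pvK a ≤ pvK b) → (l.map (·.1)).Nodup →
      ∀ x, x ∈ pvUE cat l seen ↔
        x ∈ l ∧ cat x.2.1 ∉ seen ∧ ∀ e' ∈ l, cat e'.2.1 = cat x.2.1 → pvK x ≤ pvK e' := by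
  intro l
  induction l with
  | nil => intro seen _ _ x; simp [pvUE]
  | cons e t ih =>
    intro seen hp hnd x
    have hpe : ∀ e' ∈ t, pvK e ≤ pvK e' := (List.pairwise_cons.mp hp).1
    have hpt := (List.pairwise_cons.mp hp).2
    rw [List.map_cons] at hnd
    have hnde : e.1 ∉ t.map (·.1) := (List.nodup_cons.mp hnd).1
    have hndt : (t.map (·.1)).Nodup := (List.nodup_cons.mp hnd).2
    have hkey : ∀ y ∈ t, cat y.2.1 = cat e.2.1 → pvK y ≤ pvK e → False := by
      intro y hy hcy hle
      have heq : pvK y = pvK e := le_antisymm hle (hpe y hy)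
      have h1 : y.1 = e.1 := by
        have := congrArg (fun k => (ofLex k).2) heq
        simpa [pvK] using this
      exact hnde (h1 ▸ List.mem_map_of_mem (f := (·.1)) hy)
    unfold pvUE
    by_cases hm : cat e.2.1 ∈ seen
    · rw [if_pos (by simpa [PySem.Set.contains] using hm)]
      rw [ih seen hpt hndt x]
      constructor
      · rintro ⟨hx, hs, hmin⟩
        refine ⟨List.mem_cons_of_mem _ hx, hs, ?_⟩
        intro e' he' hce'
        rcases List.mem_cons.mp he' with rfl | he'
        · exact absurd (hce' ▸ hm) hs
        · exact hmin e' he' hce'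
      · rintro ⟨hx, hs, hmin⟩
        rcases List.mem_cons.mp hx with rfl | hx
        · exact absurd hm hs
        · exact ⟨hx, hs, fun e' he' hc => hmin e' (List.mem_cons_of_mem _ he') hc⟩
    · rw [if_neg (by simpa [PySem.Set.contains] using hm)]
      rw [List.mem_cons]
      constructor
      · rintro (rfl | hx)
        · refine ⟨List.mem_cons_self, hm, ?_⟩
          intro e' he' _
          rcases List.mem_cons.mp he' with rfl | he'
          · exact le_refl _
          · exact hpe e' he'
        · rw [ih _ hpt hndt x] at hx
          obtain ⟨hxt, hs, hmin⟩ := hx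
          have hs1 : cat x.2.1 ∉ seen := fun hin => hs ((PySem.Set.mem_add seen _ _).mpr (Or.inl hin))
          have hs2 : cat x.2.1 ≠ cat e.2.1 := fun heq => hs ((PySem.Set.mem_add seen _ _).mpr (Or.inr heq))
          refine ⟨List.mem_cons_of_mem _ hxt, hs1, ?_⟩
          intro e' he' hce'
          rcases List.mem_cons.mp he' with rfl | he'
          · exact absurd hce'.symm hs2
          · exact hmin e' he' hce'
      · rintro ⟨hx, hs, hmin⟩
        rcases List.mem_cons.mp hx with rfl | hx
        · exact Or.inl rfl
        · right
          rw [ih _ hpt hndt x]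
          have hne : cat x.2.1 ≠ cat e.2.1 := by
            intro heq
            exact hkey x hx heq (hmin e List.mem_cons_self (by rw [heq]))
          refine ⟨hx, ?_, fun e' he' hc => hmin e' (List.mem_cons_of_mem _ he') hc⟩
          intro hin
          rcases (PySem.Set.mem_add seen _ _).mp hin with h | h
          · exact hs h
          · exact hne h

-- the invariant of B's representative fold
def pvGood (cat : String → String) (done : List (Int × String × Int)) (b : PySem.Dict String (Int × Int × String)) : Prop :=
  b.keys.Nodup ∧
  (∀ c t, b.get? c = some t → ∃ e ∈ done, pvPsi e = t ∧ cat e.2.1 = c ∧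
      ∀ e' ∈ done, cat e'.2.1 = c → pvK e ≤ pvK e') ∧
  (∀ e ∈ done, b.contains (cat e.2.1) = true)

lemma contains_get? {ν : Type} (d : PySem.Dict String ν) (c : String) (h : d.contains c = true) :
    ∃ t, d.get? c = some t := by
  cases hg : d.get? c with
  | none =>
    rw [PySem.Dict.get?_eq_none_iff_not_mem_keys] at hg
    rw [PySem.Dict.contains_iff_mem_keys] at h
    exact absurd h hg
  | some t => exact ⟨t, rfl⟩

lemma bestStep (cat : String → String) (done : List (Int × String × Int)) (b : PySem.Dict String (Int × Int × String))
    (e : Int × String × Int) (hg : pvGood cat done b) (hfst : ∀ d ∈ done, d.1 < e.1) :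
    pvGood cat (done ++ [e]) (pvStepB cat b e) := by
  obtain ⟨hnd, hmem, hall⟩ := hg
  unfold pvStepB
  by_cases hcond : (!b.contains (cat e.2.1) || decide ((b.getD (cat e.2.1) (0, 0, "")).1 < e.2.2)) = true
  · rw [if_pos hcond]
    refine ⟨PySem.Dict.nodup_keys_insert _ _ _ hnd, ?_, ?_⟩
    · intro c t hget
      by_cases hc : c = cat e.2.1
      · subst hc
        rw [PySem.Dict.get?_insert_self] at hget
        have ht : t = pvPsi e := by injection hget with h; exact h.symm
        refine ⟨e, by simp, ht.symm, rfl, ?_⟩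
        intro e' he' hce'
        rcases List.mem_append.mp he' with he' | he'
        · -- e' ∈ done with the same category
          rcases Bool.or_eq_true _ _ |>.mp hcond with hnc | hsc
          · -- category not yet present: impossible, e' would have registered it
            have := hall e' he'
            rw [hce'] at this
            rw [Bool.not_eq_true'] at hnc
            rw [hnc] at this
            exact absurd this (by simp)
          · -- present with a strictly smaller score: e beats the stored minimum
            have hct : b.contains (cat e.2.1) = true := by
              have := hall e' he'
              rwa [hce'] at this
            obtain ⟨t₀, hg0⟩ := contains_get? b (cat e.2.1) hct
            obtain ⟨e₀, he₀, hpsi₀, hcat₀, hmin₀⟩ := hmem _ _ hg0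
            have hgd : b.getD (cat e.2.1) (0, 0, "") = t₀ := by
              rw [PySem.Dict.getD_eq_get?_getD, hg0]; rfl
            rw [hgd] at hsc
            have hs0 : t₀.1 = e₀.2.2 := by rw [← hpsi₀]; rfl
            have hlt : pvK e < pvK e₀ := by
              simp only [pvK, Prod.Lex.toLex_lt_toLex]
              left
              simp only [decide_eq_true_eq] at hsc
              omega
            exact le_of_lt (lt_of_lt_of_le hlt (hmin₀ e' he' hce'))
        · simp only [List.mem_singleton] at he'
          subst he'
          exact le_refl _
      · rw [PySem.Dict.get?_insert_of_ne _ _ hc] at hget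
        obtain ⟨e₀, he₀, hpsi₀, hcat₀, hmin₀⟩ := hmem _ _ hget
        refine ⟨e₀, List.mem_append_left _ he₀, hpsi₀, hcat₀, ?_⟩
        intro e' he' hce'
        rcases List.mem_append.mp he' with he' | he'
        · exact hmin₀ e' he' hce'
        · simp only [List.mem_singleton] at he'
          subst he'
          exact absurd hce'.symm hc
    · intro e' he'
      rcases List.mem_append.mp he' with he' | he'
      · rw [PySem.Dict.contains_insert]
        simp [hall e' he']
      · simp only [List.mem_singleton] at he'
        subst he'
        exact PySem.Dict.contains_insert_self _ _ _
  · rw [if_neg hcond]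
    have hct : b.contains (cat e.2.1) = true := by
      by_contra hcf
      have : b.contains (cat e.2.1) = false := by simpa using hcf
      simp [this] at hcond
    have hge : ¬ ((b.getD (cat e.2.1) (0, 0, "")).1 < e.2.2) := by
      intro hlt
      simp [hlt] at hcond
    refine ⟨hnd, ?_, ?_⟩
    · intro c t hget
      obtain ⟨e₀, he₀, hpsi₀, hcat₀, hmin₀⟩ := hmem _ _ hget
      refine ⟨e₀, List.mem_append_left _ he₀, hpsi₀, hcat₀, ?_⟩
      intro e' he' hce'
      rcases List.mem_append.mp he' with he' | he'
      · exact hmin₀ e' he' hce'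
      · simp only [List.mem_singleton] at he'
        subst he'
        -- e' = e and cat e.2.1 = c, so c is e's category and the stored value is t
        have hcc : c = cat e'.2.1 := hce'.symm
        have hgd : b.getD (cat e'.2.1) (0, 0, "") = t := by
          rw [← hcc, PySem.Dict.getD_eq_get?_getD, hget]; rfl
        rw [hgd] at hge
        have hs0 : t.1 = e₀.2.2 := by rw [← hpsi₀]; rfl
        have hi0 : e₀.1 < e'.1 := hfst e₀ he₀
        have hs' : e'.2.2 ≤ t.1 := le_of_not_gt hge
        have hlt : pvK e₀ < pvK e' := by
          simp only [pvK, Prod.Lex.toLex_lt_toLex]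
          omega
        exact le_of_lt hlt
    · intro e' he'
      rcases List.mem_append.mp he' with he' | he'
      · exact hall e' he'
      · simp only [List.mem_singleton] at he'
        subst he'
        exact hct

lemma bestFold (cat : String → String) :
    ∀ (l done : List (Int × String × Int)) (b : PySem.Dict String (Int × Int × String)),
      pvGood cat done b → (done ++ l).Pairwise (fun a b => a.1 < b.1) →
      pvGood cat (done ++ l) (l.foldl (pvStepB cat) b) := by
  intro l
  induction l with
  | nil => intro done b hg _; simpa using hg
  | cons e t ih =>
    intro done b hg hpw
    have hfst : ∀ d ∈ done, d.1 < e.1 := by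
      have := (List.pairwise_append.mp hpw).2.2
      intro d hd
      exact this d hd e (by simp)
    have hstep := bestStep cat done b e hg hfst
    have hpw' : ((done ++ [e]) ++ t).Pairwise (fun a b => a.1 < b.1) := by
      simpa [List.append_assoc] using hpw
    have := ih (done ++ [e]) (pvStepB cat b e) hstep hpw'
    simpa [List.append_assoc] using this

lemma psi_inj : Function.Injective pvPsi := by
  rintro ⟨a1, a2, a3⟩ ⟨b1, b2, b3⟩ h
  simp only [pvPsi, Prod.mk.injEq] at h
  simp [h.1, h.2.1, h.2.2]

-- the selection phases agree over an arbitrary score list M and category function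
lemma core (cat : String → String) (M : List (String × Int)) (n : Int) :
    (pvSelA cat n (PySem.List.sorted M (fun x => x.2) true) ([], PySem.Set.empty)).1
      = ((PySem.List.sorted2 ((PySem.List.enumerate M).foldl (pvStepB cat) PySem.Dict.empty).values
          (fun t => -t.1) (fun t => t.2.1)).take n.toNat).map (fun t => t.2.2) := by
  by_cases hn : 0 < n
  case neg =>
    rw [selA_frozen cat n _ _ (by simp only [List.length_nil, Int.natCast_zero, ge_iff_le]; omega)]
    have : n.toNat = 0 := by omega
    simp [this]
  case pos =>
  have hperm : (PySem.List.sorted (PySem.List.enumerate M) pvK).Perm (PySem.List.enumerate M) :=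
    PySem.List.sorted_perm _ _ _
  have hpwLE : (PySem.List.sorted (PySem.List.enumerate M) pvK).Pairwise (fun a b => pvK a ≤ pvK b) :=
    PySem.List.sorted_pairwise _ _
  have hndLE : ((PySem.List.sorted (PySem.List.enumerate M) pvK).map (·.1)).Nodup :=
    nodup_fst_of_perm_enumerate M _ hperm
  have hfstE := fst_inj_of_perm_enumerate M (PySem.List.enumerate M) (List.Perm.refl _)
  have hgood : pvGood cat (PySem.List.enumerate M) ((PySem.List.enumerate M).foldl (pvStepB cat) PySem.Dict.empty) := by
    have h0 : pvGood cat [] PySem.Dict.empty := by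
      refine ⟨PySem.Dict.nodup_keys_empty, ?_, ?_⟩
      · intro c t h; rw [PySem.Dict.get?_empty] at h; exact absurd h (by simp)
      · intro e h; exact absurd h (by simp)
    have := bestFold cat (PySem.List.enumerate M) [] PySem.Dict.empty h0
      (by simpa using PySem.List.pairwise_lt_enumerate M 0)
    simpa using this
  obtain ⟨hndB, hmemB, hallB⟩ := hgood
  -- membership characterization of the uncapped selection, minima taken over the raw enumerate
  have humem : ∀ x, x ∈ pvUE cat (PySem.List.sorted (PySem.List.enumerate M) pvK) PySem.Set.empty ↔
      x ∈ PySem.List.enumerate M ∧ ∀ e' ∈ PySem.List.enumerate M, cat e'.2.1 = cat x.2.1 → pvK x ≤ pvK e' := by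
    intro x
    rw [uE_mem cat _ _ hpwLE hndLE x, hperm.mem_iff]
    constructor
    · rintro ⟨h1, _, h3⟩
      exact ⟨h1, fun e' he' hc => h3 e' (hperm.mem_iff.mpr he') hc⟩
    · rintro ⟨h1, h3⟩
      exact ⟨h1, by simp [PySem.Set.empty], fun e' he' hc => h3 e' (hperm.mem_iff.mp he') hc⟩
  -- two minima of the same category coincide
  have huniq : ∀ x ∈ PySem.List.enumerate M, ∀ y ∈ PySem.List.enumerate M, cat x.2.1 = cat y.2.1 →
      (∀ e' ∈ PySem.List.enumerate M, cat e'.2.1 = cat x.2.1 → pvK x ≤ pvK e') →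
      (∀ e' ∈ PySem.List.enumerate M, cat e'.2.1 = cat y.2.1 → pvK y ≤ pvK e') → x = y := by
    intro x hx y hy hc hmx hmy
    have h1 : pvK x ≤ pvK y := hmx y hy hc.symm
    have h2 : pvK y ≤ pvK x := hmy x hx hc
    have heq : pvK x = pvK y := le_antisymm h1 h2
    have hf : x.1 = y.1 := by
      have := congrArg (fun k => (ofLex k).2) heq
      simpa [pvK] using this
    exact hfstE x hx y hy hf
  -- values of the representative dict = the uncapped selection, as sets
  have hvals : ∀ x, x ∈ ((PySem.List.enumerate M).foldl (pvStepB cat) PySem.Dict.empty).values ↔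
      x ∈ (pvUE cat (PySem.List.sorted (PySem.List.enumerate M) pvK) PySem.Set.empty).map pvPsi := by
    intro x
    constructor
    · intro hx
      have hx' : ∃ c, (c, x) ∈ ((PySem.List.enumerate M).foldl (pvStepB cat) PySem.Dict.empty).items := by
        simpa [PySem.Dict.values, List.mem_map, Prod.exists] using hx
      obtain ⟨c, hcx⟩ := hx'
      have hget := PySem.Dict.get?_of_mem_items _ hcx hndB
      obtain ⟨e₀, he₀, hpsi₀, hcat₀, hmin₀⟩ := hmemB _ _ hget
      have : e₀ ∈ pvUE cat (PySem.List.sorted (PySem.List.enumerate M) pvK) PySem.Set.empty := by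
        rw [humem]
        exact ⟨he₀, fun e' he' hc => hmin₀ e' he' (by rw [hc, hcat₀])⟩
      exact hpsi₀ ▸ List.mem_map_of_mem this
    · intro hx
      obtain ⟨e, he, rfl⟩ := List.mem_map.mp hx
      rw [humem] at he
      obtain ⟨heE, hmin⟩ := he
      obtain ⟨t, hget⟩ := contains_get? _ _ (hallB e heE)
      obtain ⟨e₀, he₀, hpsi₀, hcat₀, hmin₀⟩ := hmemB _ _ hget
      have he0e : e₀ = e := huniq e₀ he₀ e heE hcat₀ (fun e' he' hc => hmin₀ e' he' (by rw [hc, hcat₀])) hmin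
      have : (cat e.2.1, pvPsi e) ∈ ((PySem.List.enumerate M).foldl (pvStepB cat) PySem.Dict.empty).items := by
        have := PySem.Dict.mem_items_of_get?_eq_some _ hget
        rwa [← hpsi₀, he0e] at this
      simpa [PySem.Dict.values] using List.mem_map_of_mem (f := (·.2)) this
  -- both lists are duplicate-free
  have hndu : (pvUE cat (PySem.List.sorted (PySem.List.enumerate M) pvK) PySem.Set.empty).Nodup :=
    ((uE_sublist _ _ _).nodup (List.Nodup.of_map _ hndLE))
  have hndmap : ((pvUE cat (PySem.List.sorted (PySem.List.enumerate M) pvK) PySem.Set.empty).map pvPsi).Nodup :=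
    hndu.map psi_inj
  have hndvals : ((PySem.List.enumerate M).foldl (pvStepB cat) PySem.Dict.empty).values.Nodup := by
    rw [PySem.Dict.values_eq_map_keys _ hndB (0, 0, "")]
    refine List.Nodup.map_on ?_ hndB
    intro c hc c' hc' hgd
    obtain ⟨t, hget⟩ := contains_get? _ c ((PySem.Dict.contains_iff_mem_keys _ _).mpr hc)
    obtain ⟨t', hget'⟩ := contains_get? _ c' ((PySem.Dict.contains_iff_mem_keys _ _).mpr hc')
    have h1 : ((PySem.List.enumerate M).foldl (pvStepB cat) PySem.Dict.empty).getD c (0, 0, "") = t := by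
      rw [PySem.Dict.getD_eq_get?_getD, hget]; rfl
    have h2 : ((PySem.List.enumerate M).foldl (pvStepB cat) PySem.Dict.empty).getD c' (0, 0, "") = t' := by
      rw [PySem.Dict.getD_eq_get?_getD, hget']; rfl
    have htt : t = t' := by rw [← h1, ← h2, hgd]
    obtain ⟨e₀, _, hpsi₀, hcat₀, _⟩ := hmemB _ _ hget
    obtain ⟨e₁, _, hpsi₁, hcat₁, _⟩ := hmemB _ _ hget'
    have : e₀ = e₁ := psi_inj (by rw [hpsi₀, hpsi₁, htt])
    rw [← hcat₀, ← hcat₁, this]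
  have hpermval : ((pvUE cat (PySem.List.sorted (PySem.List.enumerate M) pvK) PySem.Set.empty).map pvPsi).Perm
      ((PySem.List.enumerate M).foldl (pvStepB cat) PySem.Dict.empty).values := by
    refine List.perm_of_nodup_nodup_toFinset_eq hndmap hndvals ?_
    ext x
    simp only [List.mem_toFinset]
    exact (hvals x).symm
  -- the uncapped selection is strictly increasing in the lex key
  have hpwu : ((pvUE cat (PySem.List.sorted (PySem.List.enumerate M) pvK) PySem.Set.empty).map pvPsi).Pairwise
      (fun a b => (fun t => toLex ((-t.1 : Int), t.2.1)) a < (fun t => toLex ((-t.1 : Int), t.2.1)) b) := by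
    refine List.pairwise_map.mpr ?_
    have hle : (pvUE cat (PySem.List.sorted (PySem.List.enumerate M) pvK) PySem.Set.empty).Pairwise
        (fun a b => pvK a ≤ pvK b) := List.Pairwise.sublist (uE_sublist _ _ _) hpwLE
    have hfstu : ((pvUE cat (PySem.List.sorted (PySem.List.enumerate M) pvK) PySem.Set.empty).map (·.1)).Nodup :=
      hndLE.sublist ((uE_sublist _ _ _).map _)
    have hne : (pvUE cat (PySem.List.sorted (PySem.List.enumerate M) pvK) PySem.Set.empty).Pairwise
        (fun a b => a.1 ≠ b.1) := List.pairwise_map.mp hfstu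
    refine (hle.and hne).imp ?_
    rintro a b ⟨h1, h2⟩
    rcases lt_or_eq_of_le h1 with h | h
    · exact h
    · exact absurd (by simpa [pvK] using congrArg (fun k => (ofLex k).2) h) h2
  rw [sorted2_eq_sorted_lex, PySem.List.sorted_eq_of_perm_of_pairwise_lt _ _ _ hpermval hpwu]
  rw [selA_run cat n _ [] PySem.Set.empty (by simpa using hn)]
  rw [sorted_rev_stability M, uM_map]
  simp only [List.map_take, List.map_map, List.nil_append, Nat.sub_zero, List.length_nil]
  rfl

-- ===== VERDICT (by name: the statement is the Claim_ definition above) =====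
theorem recommend_mods_with_culling_spec : Claim_equal_recommend_mods_with_culling := by
  intro cp co mc n _ _
  show recommend_mods_with_culling cp co mc n = recommend_mods_with_culling_alt cp co mc n
  have hA : recommend_mods_with_culling cp co mc n
      = (pvSelA (pvCat mc) n (PySem.List.sorted (pvScores cp co).items (fun x => x.2) true) ([], PySem.Set.empty)).1 := rfl
  have hB : recommend_mods_with_culling_alt cp co mc n
      = ((PySem.List.sorted2 ((PySem.List.enumerate (pvScores cp co).items).foldl (pvStepB (pvCat mc)) PySem.Dict.empty).values
          (fun t => -t.1) (fun t => t.2.1)).take n.toNat).map (fun t => t.2.2) := rfl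
  rw [hA, hB, core]
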